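-- pv_equiv track=rewrite | github.com/Mistik535/homework | 06_07.py | calculating
-- ===== SOURCE A (Python) =====
-- def calculating(number_list):
--     counted_list = []
--     length = len(number_list)
--     for i in range(length):
--         left_border = number_list[(i - 1) % length]
--         right_border = number_list[(i + 1) % length]
--         summary = left_border + right_border
--         counted_list.append(summary)
--     return counted_list
-- ===== SOURCE B (Python) =====
-- def calculating(number_list):
--     left = number_list[-1:] + number_list[:-1]
--     right = number_list[1:] + number_list[:1]
--     return [l + r for l, r in zip(left, right)]
-- ===== Notes on version B (the rewrite author's own statement) =====
-- stated objective: idiomatic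
-- what changed: Replaces per-index modular indexing in an explicit append loop by two precomputed rotations built with slicing/concatenation, combined element-wise with zip.
import Mathlib
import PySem

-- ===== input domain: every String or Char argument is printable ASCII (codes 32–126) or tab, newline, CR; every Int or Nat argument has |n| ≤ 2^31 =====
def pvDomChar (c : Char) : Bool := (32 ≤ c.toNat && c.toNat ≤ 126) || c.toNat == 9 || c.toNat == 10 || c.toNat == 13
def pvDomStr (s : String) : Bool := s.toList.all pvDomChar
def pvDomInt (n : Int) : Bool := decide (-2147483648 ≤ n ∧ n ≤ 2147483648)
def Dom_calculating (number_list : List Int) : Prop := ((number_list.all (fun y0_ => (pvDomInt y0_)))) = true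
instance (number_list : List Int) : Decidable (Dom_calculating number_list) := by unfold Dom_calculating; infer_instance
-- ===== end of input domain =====

-- B builds the two circular rotations by slicing and zips them, instead of A's per-index modular arithmetic; same cost, more idiomatic.

-- ===== PORT A =====
def calculating (number_list : List Int) : List Int :=
  let length : Int := number_list.length
  (PySem.List.pyRange 0 length 1).foldl
    (fun counted_list i =>
      let left_border := PySem.List.pyGetD number_list (PySem.Int.mod (i - 1) length) 0
      let right_border := PySem.List.pyGetD number_list (PySem.Int.mod (i + 1) length) 0
      let summary := left_border + right_border
      counted_list ++ [summary]) []

-- ===== PORT B =====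
def calculating_alt (number_list : List Int) : List Int :=
  let left := PySem.List.slice number_list (some (-1)) none ++ PySem.List.slice number_list none (some (-1))
  let right := PySem.List.slice number_list (some 1) none ++ PySem.List.slice number_list none (some 1)
  List.zipWith (· + ·) left right

-- ===== PRECONDITION & SPEC =====
def Spec_calculating (number_list : List Int) (out : List Int) : Prop := out = calculating_alt number_list
instance (number_list : List Int) (out : List Int) : Decidable (Spec_calculating number_list out) := by unfold Spec_calculating; infer_instance

-- ===== CLAIM (what is proved, stated in full; the proofs are below) =====
def Claim_equal_calculating : Prop := ∀ (number_list : List Int), Dom_calculating number_list → Spec_calculating number_list (calculating number_list)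

-- ===== LEMMAS AND PROOFS =====

theorem calc_A_map (xs : List Int) :
    calculating xs = (List.range xs.length).map (fun (k : Nat) =>
      PySem.List.pyGetD xs (PySem.Int.mod ((k : Int) - 1) (xs.length : Int)) 0 +
      PySem.List.pyGetD xs (PySem.Int.mod ((k : Int) + 1) (xs.length : Int)) 0) := by
  show (PySem.List.pyRange 0 (xs.length : Int) 1).foldl _ [] = _
  rw [PySem.List.pyRange_zero_natCast, PySem.List.foldl_append_singleton_eq_map, List.map_map]
  rfl

theorem calc_B_shape (xs : List Int) :
    calculating_alt xs = List.zipWith (· + ·)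
      (xs.drop (xs.length - 1) ++ xs.dropLast) (xs.tail ++ xs.take 1) := by
  have h1 : PySem.List.slice xs none (some 1) = xs.take 1 := by
    rw [show (1 : Int) = ((1 : Nat) : Int) from rfl, PySem.List.slice_to_natCast]
  simp [calculating_alt, PySem.List.slice_from_neg_one, PySem.List.slice_to_neg_one,
    PySem.List.slice_from_one, h1]

-- ===== VERDICT (by name: the statement is the Claim_ definition above) =====
theorem calculating_spec : Claim_equal_calculating := by
  intro xs _
  unfold Spec_calculating
  rw [calc_A_map, calc_B_shape]
  set n := xs.length with hn
  have hlenL : (xs.drop (n - 1) ++ xs.dropLast).length = n := by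
    cases xs with
    | nil => simp [hn]
    | cons a t => simp [hn]; omega
  have hlenR : (xs.tail ++ xs.take 1).length = n := by
    cases xs with
    | nil => simp [hn]
    | cons a t => simp [hn]
  apply List.ext_getElem
  · simp [hlenL, hlenR]
  · intro k hk1 hk2
    simp only [List.getElem_map, List.getElem_range] at *
    have hkn : k < n := by simpa using hk1
    have hnpos : 0 < n := Nat.lt_of_le_of_lt (Nat.zero_le k) hkn
    have hnIpos : (0 : Int) < (n : Int) := by exact_mod_cast hnpos
    rw [List.getElem_zipWith]
    -- left element of the zip
    have hL : (xs.drop (n - 1) ++ xs.dropLast)[k]'(by omega) =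
        xs[(if k = 0 then n - 1 else k - 1)]'(by split <;> omega) := by
      have hdl : (xs.drop (n - 1)).length = 1 := by simp [hn]; omega
      by_cases hk0 : k = 0
      · subst hk0
        rw [List.getElem_append_left (by omega)]
        simp [List.getElem_drop, hn]
      · rw [List.getElem_append_right (by omega)]
        simp only [hdl]
        rw [List.getElem_dropLast]
        simp [hk0]
    -- right element of the zip
    have hR : (xs.tail ++ xs.take 1)[k]'(by omega) =
        xs[(if k = n - 1 then 0 else k + 1)]'(by split <;> omega) := by
      have htl : xs.tail.length = n - 1 := by simp [hn]
      by_cases hke : k = n - 1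
      · subst hke
        rw [List.getElem_append_right (by omega)]
        simp [htl, List.getElem_take]
      · rw [List.getElem_append_left (by omega)]
        rw [List.getElem_tail]
        simp [hke]
    rw [hL, hR]
    -- A's two modular indices
    have hmodL : PySem.Int.mod ((k : Int) - 1) n = ((if k = 0 then n - 1 else k - 1 : Nat) : Int) := by
      rw [PySem.Int.mod_eq_emod_of_pos hnIpos]
      by_cases hk0 : k = 0
      · subst hk0
        have h2 : (-1 : Int) % (n : Int) = (n : Int) - 1 := by
          have h3 : ((-1 : Int) + (n : Int) * 1) % (n : Int) = (-1 : Int) % (n : Int) :=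
            Int.add_mul_emod_self_left (-1) (n : Int) 1
          rw [← h3, show (-1 : Int) + (n : Int) * 1 = (n : Int) - 1 by ring,
            Int.emod_eq_of_lt (by omega) (by omega)]
        simp only [Nat.cast_zero, zero_sub, reduceIte]
        rw [h2]; omega
      · have : ((k : Int) - 1) % n = (k : Int) - 1 := by
          apply Int.emod_eq_of_lt <;> omega
        rw [this]; simp [hk0]; omega
    have hmodR : PySem.Int.mod ((k : Int) + 1) n = ((if k = n - 1 then 0 else k + 1 : Nat) : Int) := by
      rw [PySem.Int.mod_eq_emod_of_pos hnIpos]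
      by_cases hke : k = n - 1
      · subst hke
        have h1 : ((n - 1 : Nat) : Int) + 1 = (n : Int) := by omega
        rw [h1, Int.emod_self]
        simp
      · have : ((k : Int) + 1) % n = (k : Int) + 1 := by
          apply Int.emod_eq_of_lt <;> omega
        rw [this]; simp [hke]
    rw [hmodL, hmodR]
    rw [PySem.List.pyGetD_natCast, PySem.List.pyGetD_natCast]
    rw [List.getD_eq_getElem _ _ (by split <;> omega), List.getD_eq_getElem _ _ (by split <;> omega)]
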